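-- pv_equiv track=rewrite | github.com/kindofwwy/Shen | testfile/shentest7-transformer.py | gushi_split
-- ===== SOURCE A (Python) =====
-- def gushi_split(gushi_text:str):
--     texts=[]
--     t=""
--     for i in gushi_text:
--         if i.isdigit():
--             if t!="":
--                 texts.append(t)
--                 t=""
--         else:
--             t+=i
--     return texts
-- ===== SOURCE B (Python) =====
-- from itertools import groupby
--
-- def gushi_split(gushi_text: str):
--     texts = []
--     pending = ""
--     for is_digit_run, run in groupby(gushi_text, key=str.isdigit):
--         if is_digit_run:
--             if pending:
--                 texts.append(pending)
--                 pending = ""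
--         else:
--             pending = "".join(run)
--     return texts
-- ===== Notes on version B (the rewrite author's own statement) =====
-- stated objective: idiomatic
-- what changed: B traverses maximal same-class runs via itertools.groupby instead of per-character accumulator bookkeeping: a non-digit run becomes the pending segment in one join, a digit run flushes it; no flush after the loop, matching A's dropping of a trailing segment.
import Mathlib
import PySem

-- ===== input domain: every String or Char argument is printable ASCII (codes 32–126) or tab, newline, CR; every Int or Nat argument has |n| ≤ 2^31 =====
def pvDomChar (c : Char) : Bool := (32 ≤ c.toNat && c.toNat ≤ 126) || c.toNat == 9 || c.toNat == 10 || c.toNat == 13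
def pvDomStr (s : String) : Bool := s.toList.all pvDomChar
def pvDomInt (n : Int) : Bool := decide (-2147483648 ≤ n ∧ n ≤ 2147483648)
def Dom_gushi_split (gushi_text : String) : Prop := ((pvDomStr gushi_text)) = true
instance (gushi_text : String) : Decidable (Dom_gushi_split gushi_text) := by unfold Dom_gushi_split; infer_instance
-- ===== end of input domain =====

-- B replaces A's per-character accumulator bookkeeping by an itertools.groupby traversal of
-- maximal same-class runs (a non-digit run becomes the pending segment in one join, a digit
-- run flushes it; no flush after the loop, so a trailing non-digit segment is dropped as in A).

-- ===== PORT A =====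
-- A's loop state: (texts, t); t is kept as List Char ('t += i' appends a char, flush wraps it in String.ofList)
def pvAStep (st : List String × List Char) (c : Char) : List String × List Char :=
  if PySem.Chars.isdigit c then
    (if st.2 ≠ [] then (st.1 ++ [String.ofList st.2], []) else st)
  else (st.1, st.2 ++ [c])

def gushi_split (gushi_text : String) : List String :=
  (gushi_text.toList.foldl pvAStep ([], [])).1

-- ===== PORT B =====
-- itertools.groupby(gushi_text, key=str.isdigit): the maximal runs of same-isdigit characters
def pvRuns (l : List Char) : List (Bool × List Char) :=
  match l with
  | [] => []
  | c :: cs =>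
    match pvRuns cs with
    | [] => [(PySem.Chars.isdigit c, [c])]
    | (k, r) :: rest =>
      if PySem.Chars.isdigit c = k then (k, c :: r) :: rest
      else (PySem.Chars.isdigit c, [c]) :: (k, r) :: rest

-- B's loop over groups: digit run flushes pending, non-digit run becomes pending ("".join(run))
def pvBStep (st : List String × List Char) (g : Bool × List Char) : List String × List Char :=
  if g.1 then (if st.2 ≠ [] then (st.1 ++ [String.ofList st.2], []) else st)
  else (st.1, g.2)

def gushi_split_alt (gushi_text : String) : List String :=
  ((pvRuns gushi_text.toList).foldl pvBStep ([], [])).1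

-- ===== PRECONDITION & SPEC =====
def Spec_gushi_split (gushi_text : String) (out : List String) : Prop := out = gushi_split_alt gushi_text
instance (gushi_text : String) (out : List String) : Decidable (Spec_gushi_split gushi_text out) := by unfold Spec_gushi_split; infer_instance

-- ===== CLAIM (what is proved, stated in full; the proofs are below) =====
def Claim_equal_gushi_split : Prop := ∀ (gushi_text : String), Dom_gushi_split gushi_text → Spec_gushi_split gushi_text (gushi_split gushi_text)

-- ===== LEMMAS AND PROOFS =====

lemma pvRuns_flatten (l : List Char) : ((pvRuns l).map (·.2)).flatten = l := by
  induction l with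
  | nil => simp [pvRuns]
  | cons c cs ih =>
    unfold pvRuns
    rcases h : pvRuns cs with _ | ⟨⟨k, r⟩, rest⟩
    · simp_all
    · by_cases hk : PySem.Chars.isdigit c = k <;> simp_all

lemma pvRuns_mem (l : List Char) :
    ∀ p ∈ pvRuns l, p.2 ≠ [] ∧ ∀ c ∈ p.2, PySem.Chars.isdigit c = p.1 := by
  induction l with
  | nil => simp [pvRuns]
  | cons c cs ih =>
    unfold pvRuns
    rcases h : pvRuns cs with _ | ⟨⟨k, r⟩, rest⟩
    · simp
    · rw [h] at ih
      by_cases hk : PySem.Chars.isdigit c = k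
      · simp only [hk, if_true]
        intro p hp
        rw [List.mem_cons] at hp
        rcases hp with hp | hp
        · subst hp
          have hkr := ih (k, r) (by simp)
          refine ⟨by simp, ?_⟩
          intro d hd
          rw [List.mem_cons] at hd
          rcases hd with hd | hd
          · subst hd; exact hk
          · exact hkr.2 d hd
        · exact ih p (by simp [hp])
      · simp only [hk, if_false]
        intro p hp
        rw [List.mem_cons] at hp
        rcases hp with hp | hp
        · subst hp
          refine ⟨by simp, ?_⟩
          intro d hd
          rw [List.mem_singleton] at hd
          subst hd; rfl
        · exact ih p hp

lemma pvRuns_chain (l : List Char) :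
    List.IsChain (fun a b : Bool × List Char => a.1 ≠ b.1) (pvRuns l) := by
  induction l with
  | nil => simp [pvRuns]
  | cons c cs ih =>
    unfold pvRuns
    rcases h : pvRuns cs with _ | ⟨⟨k, r⟩, rest⟩
    · simp
    · rw [h] at ih
      by_cases hk : PySem.Chars.isdigit c = k
      · simp only [hk, if_true]
        rcases rest with _ | ⟨q, rest'⟩
        · simp
        · rw [List.isChain_cons_cons] at ih ⊢
          exact ih
      · simp only [hk, if_false]
        rw [List.isChain_cons_cons]
        exact ⟨hk, ih⟩

-- a digit run with empty pending leaves the state unchanged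
lemma pvFoldl_digit_nil (r : List Char) (st : List String × List Char)
    (hd : ∀ c ∈ r, PySem.Chars.isdigit c = true) (h2 : st.2 = []) :
    r.foldl pvAStep st = st := by
  induction r generalizing st with
  | nil => simp
  | cons c r' ih =>
    have hc : PySem.Chars.isdigit c = true := hd c (by simp)
    have hs : pvAStep st c = st := by simp [pvAStep, hc, h2]
    rw [List.foldl_cons, hs]
    exact ih _ (fun d hdm => hd d (List.mem_cons_of_mem _ hdm)) h2

-- a nonempty digit run acts like one B-step (flush pending)
lemma pvFoldl_digit (r : List Char) (st : List String × List Char)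
    (hne : r ≠ []) (hd : ∀ c ∈ r, PySem.Chars.isdigit c = true) :
    r.foldl pvAStep st = pvBStep st (true, r) := by
  rcases r with _ | ⟨c, r'⟩
  · exact absurd rfl hne
  have hc : PySem.Chars.isdigit c = true := hd c (by simp)
  rw [List.foldl_cons]
  have hstep : pvAStep st c = (if st.2 ≠ [] then (st.1 ++ [String.ofList st.2], []) else st) := by
    simp [pvAStep, hc]
  have h2 : (pvAStep st c).2 = [] := by
    rw [hstep]; split_ifs with h <;> simp_all
  rw [pvFoldl_digit_nil r' _ (fun d hdm => hd d (List.mem_cons_of_mem _ hdm)) h2, hstep]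
  simp [pvBStep]

-- a non-digit run appends its characters to pending
lemma pvFoldl_nondigit (r : List Char) (st : List String × List Char)
    (hd : ∀ c ∈ r, PySem.Chars.isdigit c = false) :
    r.foldl pvAStep st = (st.1, st.2 ++ r) := by
  induction r generalizing st with
  | nil => simp
  | cons c r' ih =>
    have hc : PySem.Chars.isdigit c = false := hd c (by simp)
    rw [List.foldl_cons]
    have hs : pvAStep st c = (st.1, st.2 ++ [c]) := by simp [pvAStep, hc]
    rw [hs, ih _ (fun d hdm => hd d (List.mem_cons_of_mem _ hdm))]
    simp

-- fold transfer: A's char fold over the concatenation of valid runs equals B's run fold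
lemma pvMain (rs : List (Bool × List Char)) (st : List String × List Char)
    (hmem : ∀ p ∈ rs, p.2 ≠ [] ∧ ∀ c ∈ p.2, PySem.Chars.isdigit c = p.1)
    (hch : List.IsChain (fun a b : Bool × List Char => a.1 ≠ b.1) rs)
    (hst : st.2 = [] ∨ rs.head?.map (·.1) = some true) :
    ((rs.map (·.2)).flatten).foldl pvAStep st = rs.foldl pvBStep st := by
  induction rs generalizing st with
  | nil => simp
  | cons g rest ih =>
    obtain ⟨k, r⟩ := g
    have hg := hmem (k, r) (by simp)
    have hrest : ∀ p ∈ rest, p.2 ≠ [] ∧ ∀ c ∈ p.2, PySem.Chars.isdigit c = p.1 :=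
      fun p hp => hmem p (List.mem_cons_of_mem _ hp)
    have hch' : List.IsChain (fun a b : Bool × List Char => a.1 ≠ b.1) rest := hch.tail
    rw [List.map_cons, List.flatten_cons, List.foldl_append, List.foldl_cons]
    cases k with
    | true =>
      rw [pvFoldl_digit r st hg.1 hg.2]
      refine ih _ hrest hch' ?_
      left
      simp only [pvBStep, if_true]
      split_ifs with h
      · rfl
      · simp at h; exact h
    | false =>
      have hst2 : st.2 = [] := by
        rcases hst with h | h
        · exact h
        · simp at h
      rw [pvFoldl_nondigit r st hg.2, hst2]
      have hb : pvBStep st (false, r) = (st.1, r) := by simp [pvBStep]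
      rw [List.nil_append, ← hb, hb]
      rcases rest with _ | ⟨⟨k', r'⟩, rest'⟩
      · simp
      · refine ih _ hrest hch' ?_
        right
        rw [List.isChain_cons_cons] at hch
        have hne := hch.1
        cases k' with
        | true => simp
        | false => simp at hne

-- ===== VERDICT (by name: the statement is the Claim_ definition above) =====
theorem gushi_split_spec : Claim_equal_gushi_split := by
  intro s _
  unfold Spec_gushi_split gushi_split gushi_split_alt
  rw [← pvRuns_flatten s.toList,
      pvMain (pvRuns s.toList) ([], []) (pvRuns_mem _) (pvRuns_chain _) (Or.inl rfl),
      pvRuns_flatten]
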